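-- pv_equiv track=rewrite | github.com/AvrilMZ/Algoritmos_y_Estructuras_de_Datos | Actividades/Guia 6 - Python/6_07.py | conteo_votos_afirmativos
-- ===== SOURCE A (Python) =====
-- def conteo_votos_afirmativos(respuestas):
-- 	salida = []
-- 	contador_grupo1 = 0
-- 	contador_grupo2 = 0
-- 	contador_grupo3 = 0
-- 	for persona in respuestas:
-- 		if persona[0] in range(18, 31) and persona[1] == 'si':
-- 			contador_grupo1 += 1
-- 		elif persona[0] in range(31, 51) and persona[1] == 'si':
-- 			contador_grupo2 += 1
-- 		elif persona[0] in range(51, 71) and persona[1] == 'si':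
-- 			contador_grupo3 += 1
-- 	salida = [contador_grupo1, contador_grupo2, contador_grupo3]
-- 	return salida
-- ===== SOURCE B (Python) =====
-- def conteo_votos_afirmativos(respuestas):
-- 	afirmativos = [persona[0] for persona in respuestas if persona[1] == 'si']
-- 	return [sum(1 for edad in afirmativos if edad in range(18, 31)),
-- 	        sum(1 for edad in afirmativos if edad in range(31, 51)),
-- 	        sum(1 for edad in afirmativos if edad in range(51, 71))]
-- ===== Notes on version B (the rewrite author's own statement) =====
-- stated objective: alternative
-- what changed: Replaces the single-pass if/elif chain with three mutable counters by a filter of the ages of 'si' voters followed by three independent counting scans, one per age bucket.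
import Mathlib
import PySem

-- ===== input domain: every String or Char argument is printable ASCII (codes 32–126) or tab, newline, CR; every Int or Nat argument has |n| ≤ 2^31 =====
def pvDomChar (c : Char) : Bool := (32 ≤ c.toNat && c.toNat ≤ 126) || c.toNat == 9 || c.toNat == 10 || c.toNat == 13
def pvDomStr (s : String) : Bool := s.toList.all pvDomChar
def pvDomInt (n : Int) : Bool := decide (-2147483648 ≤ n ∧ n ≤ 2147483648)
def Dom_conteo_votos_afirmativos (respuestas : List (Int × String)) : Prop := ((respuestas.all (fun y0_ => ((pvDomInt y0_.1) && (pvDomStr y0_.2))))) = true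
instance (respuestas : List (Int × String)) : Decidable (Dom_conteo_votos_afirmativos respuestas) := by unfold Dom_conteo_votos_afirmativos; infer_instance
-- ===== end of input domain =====

-- B restructures A's one-pass if/elif counter loop into a filter of 'si' voters' ages plus three independent bucket-counting scans (alternative decomposition, same cost).
-- ===== PORT A =====
def conteo_votos_afirmativos (respuestas : List (Int × String)) : List Int :=
  let s := respuestas.foldl (fun (c : Int × Int × Int) persona =>
    if (18 ≤ persona.1 ∧ persona.1 < 31) ∧ persona.2 = "si" then (c.1 + 1, c.2.1, c.2.2)
    else if (31 ≤ persona.1 ∧ persona.1 < 51) ∧ persona.2 = "si" then (c.1, c.2.1 + 1, c.2.2)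
    else if (51 ≤ persona.1 ∧ persona.1 < 71) ∧ persona.2 = "si" then (c.1, c.2.1, c.2.2 + 1)
    else c) (0, 0, 0)
  [s.1, s.2.1, s.2.2]

-- ===== PORT B =====
def conteo_votos_afirmativos_alt (respuestas : List (Int × String)) : List Int :=
  let afirmativos := (respuestas.filter (fun persona => persona.2 == "si")).map Prod.fst
  [ (afirmativos.countP (fun edad => 18 ≤ edad ∧ edad < 31) : Int),
    (afirmativos.countP (fun edad => 31 ≤ edad ∧ edad < 51) : Int),
    (afirmativos.countP (fun edad => 51 ≤ edad ∧ edad < 71) : Int) ]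

-- ===== PRECONDITION & SPEC =====
def Spec_conteo_votos_afirmativos (respuestas : List (Int × String)) (out : List Int) : Prop := out = conteo_votos_afirmativos_alt respuestas
instance (respuestas : List (Int × String)) (out : List Int) : Decidable (Spec_conteo_votos_afirmativos respuestas out) := by unfold Spec_conteo_votos_afirmativos; infer_instance

-- ===== CLAIM (what is proved, stated in full; the proofs are below) =====
def Claim_equal_conteo_votos_afirmativos : Prop := ∀ (respuestas : List (Int × String)), Dom_conteo_votos_afirmativos respuestas → Spec_conteo_votos_afirmativos respuestas (conteo_votos_afirmativos respuestas)

-- ===== LEMMAS AND PROOFS =====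
def pvStep : (Int × Int × Int) → (Int × String) → (Int × Int × Int) := fun c persona =>
    if (18 ≤ persona.1 ∧ persona.1 < 31) ∧ persona.2 = "si" then (c.1 + 1, c.2.1, c.2.2)
    else if (31 ≤ persona.1 ∧ persona.1 < 51) ∧ persona.2 = "si" then (c.1, c.2.1 + 1, c.2.2)
    else if (51 ≤ persona.1 ∧ persona.1 < 71) ∧ persona.2 = "si" then (c.1, c.2.1, c.2.2 + 1)
    else c

def pvCnt (lo hi : Int) (l : List (Int × String)) : Int :=
  ((l.filter (fun persona => persona.2 == "si")).map Prod.fst).countP (fun edad => lo ≤ edad ∧ edad < hi)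

theorem pvFold_eq (l : List (Int × String)) (a b c : Int) :
    l.foldl pvStep (a, b, c) = (a + pvCnt 18 31 l, b + pvCnt 31 51 l, c + pvCnt 51 71 l) := by
  induction l generalizing a b c with
  | nil => simp [pvCnt]
  | cons p t ih =>
    simp only [List.foldl_cons, pvStep, pvCnt, List.filter_cons]
    by_cases hsi : p.2 = "si"
    · by_cases h1 : 18 ≤ p.1 ∧ p.1 < 31
      · have h2 : ¬ (31 ≤ p.1 ∧ p.1 < 51) := by omega
        have h3 : ¬ (51 ≤ p.1 ∧ p.1 < 71) := by omega
        simp [hsi, h1, h2, h3, ih, pvCnt]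
        try omega
      · by_cases h2 : 31 ≤ p.1 ∧ p.1 < 51
        · have h3 : ¬ (51 ≤ p.1 ∧ p.1 < 71) := by omega
          simp [hsi, h1, h2, h3, ih, pvCnt]
          try omega
        · by_cases h3 : 51 ≤ p.1 ∧ p.1 < 71
          · simp [hsi, h1, h2, h3, ih, pvCnt]
            try omega
          · simp [hsi, h1, h2, h3, ih, pvCnt]
            try omega
    · simp [hsi, ih, pvCnt]

-- ===== VERDICT (by name: the statement is the Claim_ definition above) =====
theorem conteo_votos_afirmativos_spec : Claim_equal_conteo_votos_afirmativos := by
  intro respuestas _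
  unfold Spec_conteo_votos_afirmativos conteo_votos_afirmativos conteo_votos_afirmativos_alt
  have h := pvFold_eq respuestas 0 0 0
  simp only [show (fun (c : Int × Int × Int) (persona : Int × String) =>
    if (18 ≤ persona.1 ∧ persona.1 < 31) ∧ persona.2 = "si" then (c.1 + 1, c.2.1, c.2.2)
    else if (31 ≤ persona.1 ∧ persona.1 < 51) ∧ persona.2 = "si" then (c.1, c.2.1 + 1, c.2.2)
    else if (51 ≤ persona.1 ∧ persona.1 < 71) ∧ persona.2 = "si" then (c.1, c.2.1, c.2.2 + 1)
    else c) = pvStep from rfl, h]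
  simp [pvCnt]
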